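-- pv_equiv track=rewrite | github.com/LeonardoFGaldino/Axxen-Scripts | script retificação mais utilizados com retificador final/0150, 0190, 0500 Full.py | insert_0190_after_0150
-- ===== SOURCE A (Python) =====
-- def insert_0190_after_0150(linhas, registros_0190):
--     """Insere registros 0190 após o último registro 0150 e antes do primeiro registro 0200 em um arquivo SPED."""
--     novo_conteudo = []
--     inseriu_0190 = False
--     pos_0150 = 0
--
--     for i, linha in enumerate(linhas):
--         novo_conteudo.append(linha)
--         if linha.startswith('|0150|'):
--             pos_0150 = len(novo_conteudo)
--         elif linha.startswith('|0200|') and not inseriu_0190: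
--             novo_conteudo = novo_conteudo[:pos_0150] + registros_0190 + novo_conteudo[pos_0150:]
--             inseriu_0190 = True
--
--     if not inseriu_0190:
--         novo_conteudo = novo_conteudo[:pos_0150] + registros_0190 + novo_conteudo[pos_0150:]
--
--     return novo_conteudo
-- ===== SOURCE B (Python) =====
-- def insert_0190_after_0150(linhas, registros_0190):
--     """Insere registros 0190 após o último registro 0150 e antes do primeiro registro 0200 em um arquivo SPED."""
--     limit = len(linhas)
--     for i, linha in enumerate(linhas):
--         if linha.startswith('|0200|'):
--             limit = i
--             break
--     pos = 0
--     for i, linha in enumerate(linhas[:limit]):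
--         if linha.startswith('|0150|'):
--             pos = i + 1
--     return linhas[:pos] + registros_0190 + linhas[pos:]
-- ===== Notes on version B (the rewrite author's own statement) =====
-- stated objective: simpler
-- what changed: A builds the output line by line with an inline splice latched on the first '|0200|'; B instead locates the first '|0200|' index, then the last '|0150|' before it, and returns a single slice-splice linhas[:pos] + registros_0190 + linhas[pos:].
import Mathlib
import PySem

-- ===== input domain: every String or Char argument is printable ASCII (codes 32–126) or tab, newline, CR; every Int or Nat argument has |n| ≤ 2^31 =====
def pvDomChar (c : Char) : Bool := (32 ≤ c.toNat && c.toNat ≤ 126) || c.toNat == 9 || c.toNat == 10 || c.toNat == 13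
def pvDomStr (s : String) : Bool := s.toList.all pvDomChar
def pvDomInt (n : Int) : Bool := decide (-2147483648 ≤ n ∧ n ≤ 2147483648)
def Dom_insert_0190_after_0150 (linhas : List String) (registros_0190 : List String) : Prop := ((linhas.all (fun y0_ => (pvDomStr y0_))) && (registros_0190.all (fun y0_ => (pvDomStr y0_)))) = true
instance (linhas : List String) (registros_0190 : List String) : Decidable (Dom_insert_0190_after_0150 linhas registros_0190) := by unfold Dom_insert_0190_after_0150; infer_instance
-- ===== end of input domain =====

-- B replaces A's append-loop with an inline splice-on-first-0200 by a find-index-then-single-splice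
-- decomposition (locate first '|0200|', locate last '|0150|' before it, splice once); objective: simpler.

-- ===== PORT A =====
-- loop state: (novo_conteudo, inseriu_0190, pos_0150). pos_0150 is a length of novo_conteudo
-- (0 ≤ pos ≤ len), so Python's novo[:pos] / novo[pos:] are exactly List.take / List.drop.
def insertStepA (registros_0190 : List String) (st : List String × Bool × Nat) (linha : String) :
    List String × Bool × Nat :=
  let novo := st.1 ++ [linha]
  if PySem.Str.startswith linha "|0150|" then
    (novo, st.2.1, novo.length)
  else if PySem.Str.startswith linha "|0200|" && !st.2.1 then
    (novo.take st.2.2 ++ registros_0190 ++ novo.drop st.2.2, true, st.2.2)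
  else
    (novo, st.2.1, st.2.2)

def insert_0190_after_0150 (linhas : List String) (registros_0190 : List String) : List String :=
  let st := linhas.foldl (insertStepA registros_0190) ([], false, 0)
  if st.2.1 then st.1
  else st.1.take st.2.2 ++ registros_0190 ++ st.1.drop st.2.2

-- ===== PORT B =====
-- index of the first line starting with '|0200|' (= len(linhas) if none): B's first loop with break
def firstIdx0200 : List String → Nat
  | [] => 0
  | x :: xs => if PySem.Str.startswith x "|0200|" then 0 else firstIdx0200 xs + 1

def insert_0190_after_0150_alt (linhas : List String) (registros_0190 : List String) : List String :=
  let limit := firstIdx0200 linhas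
  let pos : Int := (PySem.List.enumerate (linhas.take limit) 0).foldl
    (fun p il => if PySem.Str.startswith il.2 "|0150|" then il.1 + 1 else p) 0
  PySem.List.slice linhas none (some pos) ++ registros_0190 ++ PySem.List.slice linhas (some pos) none

-- ===== PRECONDITION & SPEC =====
def Spec_insert_0190_after_0150 (linhas : List String) (registros_0190 : List String) (out : List String) : Prop := out = insert_0190_after_0150_alt linhas registros_0190
instance (linhas : List String) (registros_0190 : List String) (out : List String) : Decidable (Spec_insert_0190_after_0150 linhas registros_0190 out) := by unfold Spec_insert_0190_after_0150; infer_instance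

-- ===== CLAIM (what is proved, stated in full; the proofs are below) =====
def Claim_equal_insert_0190_after_0150 : Prop := ∀ (linhas : List String) (registros_0190 : List String), Dom_insert_0190_after_0150 linhas registros_0190 → Spec_insert_0190_after_0150 linhas registros_0190 (insert_0190_after_0150 linhas registros_0190)

-- ===== LEMMAS AND PROOFS =====

-- the common characterisation: insertion position, scanning until the first '|0200|' line,
-- with k = index of the head of the remaining list and p = position found so far
def posFrom : List String → Nat → Nat → Nat
  | [], _, p => p
  | x :: xs, k, p =>
    if PySem.Str.startswith x "|0150|" then posFrom xs (k + 1) (k + 1)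
    else if PySem.Str.startswith x "|0200|" then p
    else posFrom xs (k + 1) p

-- a line cannot start with both markers
lemma not_both_markers (s : String) (h : PySem.Str.startswith s "|0200|" = true) :
    PySem.Str.startswith s "|0150|" = false := by
  by_contra hc
  rw [Bool.not_eq_false] at hc
  rw [PySem.Str.startswith_eq, PySem.Chars.startswith_iff] at h hc
  have := List.prefix_of_prefix_length_le hc h (by simp)
  simp at this

-- once inseriu_0190 is true the loop only appends
lemma foldA_true (registros_0190 : List String) :
    ∀ (xs acc : List String) (p : Nat),
      (xs.foldl (insertStepA registros_0190) (acc, true, p)).1 = acc ++ xs ∧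
      (xs.foldl (insertStepA registros_0190) (acc, true, p)).2.1 = true := by
  intro xs
  induction xs with
  | nil => intro acc p; simp
  | cons x xs ih =>
    intro acc p
    cases h1 : PySem.Str.startswith x "|0150|" with
    | true =>
      simp only [List.foldl_cons, insertStepA, h1, if_true, Bool.and_false, Bool.not_true]
      rw [(ih (acc ++ [x]) ((acc ++ [x]).length)).1, (ih (acc ++ [x]) ((acc ++ [x]).length)).2]
      simp
    | false =>
      simp only [List.foldl_cons, insertStepA, h1, Bool.not_true, Bool.and_false,
        if_false, Bool.false_eq_true]
      rw [(ih (acc ++ [x]) p).1, (ih (acc ++ [x]) p).2]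
      simp

-- main invariant for the not-yet-inserted phase, including the final splice
lemma foldA_false (registros_0190 : List String) :
    ∀ (xs acc : List String) (p : Nat), p ≤ acc.length →
      (let st := xs.foldl (insertStepA registros_0190) (acc, false, p)
       if st.2.1 then st.1
       else st.1.take st.2.2 ++ registros_0190 ++ st.1.drop st.2.2) =
      (acc ++ xs).take (posFrom xs acc.length p) ++ registros_0190 ++
        (acc ++ xs).drop (posFrom xs acc.length p) := by
  intro xs
  induction xs with
  | nil =>
    intro acc p hp
    simp [posFrom]
  | cons x xs ih =>
    intro acc p hp
    cases h1 : PySem.Str.startswith x "|0150|" with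
    | true =>
      have hIH := ih (acc ++ [x]) (acc.length + 1) (by simp)
      simp only [List.foldl_cons, insertStepA, h1, if_true] at hIH ⊢
      rw [posFrom]
      simp only [h1, if_true]
      rw [show acc ++ x :: xs = (acc ++ [x]) ++ xs by simp,
          show acc.length + 1 = (acc ++ [x]).length by simp,
          show (acc ++ [x]).length = List.length (acc ++ [x]) from rfl]
      simpa using hIH
    | false =>
      cases h2 : PySem.Str.startswith x "|0200|" with
      | true =>
        have hT := foldA_true registros_0190 xs
          ((acc ++ [x]).take p ++ registros_0190 ++ (acc ++ [x]).drop p) p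
        simp only [List.foldl_cons, insertStepA, h1, h2, Bool.not_false, Bool.and_true,
          if_false, if_true, Bool.false_eq_true]
        rw [hT.2]
        simp only [if_true]
        rw [hT.1]
        rw [posFrom]
        simp only [h1, h2, if_true, Bool.false_eq_true, if_false]
        have htake : (acc ++ [x]).take p = acc.take p := List.take_append_of_le_length hp
        have htake' : (acc ++ x :: xs).take p = acc.take p := List.take_append_of_le_length hp
        have hdrop : (acc ++ [x]).drop p = acc.drop p ++ [x] := List.drop_append_of_le_length hp
        have hdrop' : (acc ++ x :: xs).drop p = acc.drop p ++ x :: xs :=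
          List.drop_append_of_le_length hp
        rw [htake, htake', hdrop, hdrop']
        simp
      | false =>
        have hIH := ih (acc ++ [x]) p (by simp; omega)
        simp only [List.foldl_cons, insertStepA, h1, h2, Bool.false_and, if_false,
          Bool.false_eq_true] at hIH ⊢
        rw [posFrom]
        simp only [h1, h2, Bool.false_eq_true, if_false]
        rw [show acc ++ x :: xs = (acc ++ [x]) ++ xs by simp,
          show acc.length + 1 = (acc ++ [x]).length by simp]
        simpa using hIH

-- B's two scans compute posFrom
lemma foldB_eq_posFrom :
    ∀ (xs : List String) (k p : Nat),
      (PySem.List.enumerate (xs.take (firstIdx0200 xs)) (k : Int)).foldl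
        (fun p il => if PySem.Str.startswith il.2 "|0150|" then il.1 + 1 else p) (p : Int) =
      (posFrom xs k p : Int) := by
  intro xs
  induction xs with
  | nil => intro k p; simp [firstIdx0200, posFrom]
  | cons x xs ih =>
    intro k p
    cases h2 : PySem.Str.startswith x "|0200|" with
    | true =>
      have h1 : PySem.Str.startswith x "|0150|" = false := not_both_markers x h2
      rw [posFrom]
      simp only [h1, h2, Bool.false_eq_true, if_false, if_true]
      rw [firstIdx0200]
      simp only [h2, if_true]
      simp [PySem.List.enumerate_nil]
    | false =>
      rw [posFrom, firstIdx0200]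
      simp only [h2, Bool.false_eq_true, if_false, List.take_succ_cons,
        PySem.List.enumerate_cons, List.foldl_cons]
      cases h1 : PySem.Str.startswith x "|0150|" with
      | true =>
        simp only [if_true]
        have hIH := ih (k + 1) (k + 1)
        push_cast at hIH ⊢
        exact hIH
      | false =>
        simp only [Bool.false_eq_true, if_false]
        have hIH := ih (k + 1) p
        push_cast at hIH ⊢
        exact hIH

-- ===== VERDICT (by name: the statement is the Claim_ definition above) =====
theorem insert_0190_after_0150_spec : Claim_equal_insert_0190_after_0150 := by
  intro linhas registros_0190 _
  show insert_0190_after_0150 linhas registros_0190 = insert_0190_after_0150_alt linhas registros_0190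
  have hA := foldA_false registros_0190 linhas [] 0 (by simp)
  have hB := foldB_eq_posFrom linhas 0 0
  simp only [Nat.cast_zero] at hB
  simp only [insert_0190_after_0150, insert_0190_after_0150_alt]
  simp only [List.nil_append, List.length_nil] at hA
  rw [hA, hB, PySem.List.slice_to_natCast, PySem.List.slice_from_natCast]
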